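-- pv_equiv track=rewrite | github.com/matburnham/skyrc-gsm015 | read.py | split_flights
-- ===== SOURCE A (Python) =====
-- def split_flights(data):
--     flights = []
--     flight = []
--     for r in data:
--         if r['Data Type'] == 'DateTime':
--             if len(flight) > 0:
--                 flights.append(flight)
--             flight = []
--         flight.append(r)
--     flights.append(flight)
--     return flights
-- ===== SOURCE B (Python) =====
-- def split_flights(data):
--     groups = [[]]
--     for r in reversed(list(data)):
--         if groups[0] and groups[0][0]['Data Type'] == 'DateTime':
--             groups = [[r]] + groups
--         else:
--             groups = [[r] + groups[0]] + groups[1:]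
--     return groups
-- ===== Notes on version B (the rewrite author's own statement) =====
-- stated objective: alternative
-- what changed: A scans forward keeping a current-flight accumulator that it flushes (when non-empty) at each DateTime marker; B traverses the records in reverse and builds the group list back-to-front, starting a new group whenever the record following the current one is a marker, so no flush/empty-check state exists.
import Mathlib
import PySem

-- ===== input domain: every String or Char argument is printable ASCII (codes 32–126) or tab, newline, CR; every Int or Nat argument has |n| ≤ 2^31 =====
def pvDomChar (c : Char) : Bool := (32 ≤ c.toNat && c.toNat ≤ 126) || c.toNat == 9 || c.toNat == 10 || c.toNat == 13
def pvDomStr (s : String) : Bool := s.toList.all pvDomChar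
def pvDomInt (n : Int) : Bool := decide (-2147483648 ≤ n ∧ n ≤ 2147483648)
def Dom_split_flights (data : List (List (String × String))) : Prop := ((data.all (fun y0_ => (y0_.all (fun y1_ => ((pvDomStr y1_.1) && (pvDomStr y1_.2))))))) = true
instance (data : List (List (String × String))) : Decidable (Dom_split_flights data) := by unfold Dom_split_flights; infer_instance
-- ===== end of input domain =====

-- B replaces A's forward accumulator (flush current flight at each DateTime marker) by a
-- backward traversal that builds the groups back-to-front, splitting before each marker
-- (objective: alternative decomposition; return value only, no mutation observable).

-- r['Data Type'] == 'DateTime'  (exact: first-match lookup; none = key missing = KeyError in Python)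
def pvMarker (r : List (String × String)) : Bool :=
  (PySem.Dict.mk r).get? "Data Type" == some "DateTime"

-- ===== PORT A =====
def pvStepA (st : List (List (List (String × String))) × List (List (String × String)))
    (r : List (String × String)) :
    List (List (List (String × String))) × List (List (String × String)) :=
  if pvMarker r then
    ((if st.2.length > 0 then st.1 ++ [st.2] else st.1), [r])
  else (st.1, st.2 ++ [r])

def split_flights (data : List (List (String × String))) : List (List (List (String × String))) :=
  let st := data.foldl pvStepA ([], [])
  st.1 ++ [st.2]

-- ===== PORT B =====
def pvStepB (groups : List (List (List (String × String)))) (r : List (String × String)) :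
    List (List (List (String × String))) :=
  let g0 := groups.headD []
  if (!g0.isEmpty) && pvMarker (g0.headD []) then
    [r] :: groups
  else ([r] ++ g0) :: groups.tail

def split_flights_alt (data : List (List (String × String))) : List (List (List (String × String))) :=
  data.reverse.foldl pvStepB [[]]

-- ===== PRECONDITION & SPEC =====
-- Pre_ excludes exactly the inputs where Python A raises KeyError: a record without a 'Data Type' key.
def Pre_split_flights (data : List (List (String × String))) : Prop :=
  (data.all (fun r => ((PySem.Dict.mk r).get? "Data Type").isSome)) = true
instance (data : List (List (String × String))) : Decidable (Pre_split_flights data) := by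
  unfold Pre_split_flights; infer_instance

def pvWitness_split_flights : (List (List (String × String))) :=
  [[("Data Type", "DateTime")], [("Data Type", "GPS")], [("Data Type", "DateTime")]]

def Spec_split_flights (data : List (List (String × String))) (out : List (List (List (String × String)))) : Prop := out = split_flights_alt data
instance (data : List (List (String × String))) (out : List (List (List (String × String)))) : Decidable (Spec_split_flights data out) := by unfold Spec_split_flights; infer_instance

-- ===== CLAIM (what is proved, stated in full; the proofs are below) =====
def Claim_equal_split_flights : Prop := ∀ (data : List (List (String × String))), Dom_split_flights data → Pre_split_flights data → Spec_split_flights data (split_flights data)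


-- ===== LEMMAS AND PROOFS =====

-- the common grouping both programs compute: a new group starts before every marker
def pvF : List (List (String × String)) → List (List (List (String × String)))
  | [] => [[]]
  | r :: rs =>
      let t := pvF rs
      if (!rs.isEmpty) && pvMarker (rs.headD []) then [r] :: t
      else (r :: t.headD []) :: t.tail

theorem pvF_one (r : List (String × String)) : pvF [r] = [[r]] := by
  simp [pvF]

theorem pvF_two_marker (r r' : List (String × String)) (rs : List (List (String × String)))
    (hm : pvMarker r' = true) : pvF (r :: r' :: rs) = [r] :: pvF (r' :: rs) := by
  simp [pvF, hm]

theorem pvF_two_plain (r r' : List (String × String)) (rs : List (List (String × String)))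
    (hm : pvMarker r' = false) :
    pvF (r :: r' :: rs) = (r :: (pvF (r' :: rs)).head?.getD []) :: (pvF (r' :: rs)).tail := by
  simp [pvF, hm]

theorem pvF_cons (r : List (String × String)) (rs : List (List (String × String))) :
    ∃ t gs, pvF (r :: rs) = (r :: t) :: gs := by
  cases rs with
  | nil => exact ⟨[], [], pvF_one r⟩
  | cons r' rs' =>
      by_cases hm : pvMarker r' = true
      · exact ⟨[], pvF (r' :: rs'), pvF_two_marker r r' rs' hm⟩
      · exact ⟨_, _, pvF_two_plain r r' rs' (by simp [hm])⟩

theorem pvF_shape (data : List (List (String × String))) :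
    ((pvF data).head?.getD []) :: (pvF data).tail = pvF data := by
  cases data with
  | nil => simp [pvF]
  | cons r rs =>
      cases rs with
      | nil => simp [pvF_one]
      | cons r' rs' =>
          by_cases hm : pvMarker r' = true
          · simp [pvF_two_marker r r' rs' hm]
          · simp [pvF_two_plain r r' rs' (by simp [hm])]

def pvMerge (fl : List (List (String × String))) (data : List (List (String × String))) :
    List (List (List (String × String))) :=
  if (!data.isEmpty) && pvMarker (data.headD []) && (!fl.isEmpty) then fl :: pvF data
  else (fl ++ (pvF data).head?.getD []) :: (pvF data).tail

theorem pvMerge_empty_fl (data : List (List (String × String))) : pvMerge [] data = pvF data := by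
  unfold pvMerge
  simp [pvF_shape data]

theorem pvMerge_nil_data (fl : List (List (String × String))) : pvMerge fl [] = [fl] := by
  simp [pvMerge, pvF]

theorem pvMerge_cons_marker (fl : List (List (String × String))) (r : List (String × String))
    (rs : List (List (String × String))) (hm : pvMarker r = true) (hfl : fl ≠ []) :
    pvMerge fl (r :: rs) = fl :: pvF (r :: rs) := by
  have hfl' : fl.isEmpty = false := by simp [hfl]
  simp [pvMerge, hm, hfl']

theorem pvMerge_cons_plain (fl : List (List (String × String))) (r : List (String × String))
    (rs : List (List (String × String))) (hm : pvMarker r = false) :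
    pvMerge fl (r :: rs) = (fl ++ (pvF (r :: rs)).head?.getD []) :: (pvF (r :: rs)).tail := by
  simp [pvMerge, hm]

theorem pvMerge_single (r : List (String × String)) (rs : List (List (String × String))) :
    pvMerge [r] rs = pvF (r :: rs) := by
  cases rs with
  | nil => simp [pvMerge_nil_data, pvF_one]
  | cons r' rs' =>
      by_cases hm : pvMarker r' = true
      · rw [pvMerge_cons_marker [r] r' rs' hm (by simp), pvF_two_marker r r' rs' hm]
      · have hm' : pvMarker r' = false := by simp [hm]
        rw [pvMerge_cons_plain [r] r' rs' hm', pvF_two_plain r r' rs' hm']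
        simp

theorem pvInvA (data : List (List (String × String)))
    (flights : List (List (List (String × String)))) (flight : List (List (String × String))) :
    (data.foldl pvStepA (flights, flight)).1 ++ [(data.foldl pvStepA (flights, flight)).2]
      = flights ++ pvMerge flight data := by
  induction data generalizing flights flight with
  | nil => simp [pvMerge_nil_data]
  | cons r rs ih =>
      rw [List.foldl_cons]
      by_cases hm : pvMarker r = true
      · have hstep : pvStepA (flights, flight) r
            = ((if flight.length > 0 then flights ++ [flight] else flights), [r]) := by
          simp [pvStepA, hm]
        rw [hstep, ih, pvMerge_single]
        by_cases hfl : flight = []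
        · subst hfl
          simp [pvMerge_empty_fl]
        · have h1 : flight.length > 0 := List.length_pos_iff.mpr hfl
          rw [pvMerge_cons_marker flight r rs hm hfl, if_pos h1]
          simp
      · have hm' : pvMarker r = false := by simp [hm]
        have hstep : pvStepA (flights, flight) r = (flights, flight ++ [r]) := by
          simp [pvStepA, hm']
        rw [hstep, ih]
        congr 1
        -- pvMerge flight (r :: rs) = pvMerge (flight ++ [r]) rs
        rw [pvMerge_cons_plain flight r rs hm']
        cases rs with
        | nil => simp [pvF_one, pvMerge_nil_data]
        | cons r' rs' =>
            by_cases h2 : pvMarker r' = true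
            · rw [pvF_two_marker r r' rs' h2,
                pvMerge_cons_marker (flight ++ [r]) r' rs' h2 (by simp)]
              simp
            · have h2' : pvMarker r' = false := by simp [h2]
              rw [pvF_two_plain r r' rs' h2', pvMerge_cons_plain (flight ++ [r]) r' rs' h2']
              simp

theorem pvA_eq_F (data : List (List (String × String))) : split_flights data = pvF data := by
  show (data.foldl pvStepA ([], [])).1 ++ [(data.foldl pvStepA ([], [])).2] = pvF data
  rw [pvInvA data [] []]
  simp [pvMerge_empty_fl]

theorem pvB_eq_F (data : List (List (String × String))) : split_flights_alt data = pvF data := by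
  show data.reverse.foldl pvStepB [[]] = pvF data
  induction data with
  | nil => simp [pvF]
  | cons r rs ih =>
      rw [List.reverse_cons, List.foldl_append, ih]
      cases rs with
      | nil => simp [pvStepB, pvF]
      | cons r' rs' =>
          obtain ⟨t, gs, h⟩ := pvF_cons r' rs'
          by_cases hm : pvMarker r' = true
          · rw [pvF_two_marker r r' rs' hm, h]
            simp [pvStepB, hm]
          · have hm' : pvMarker r' = false := by simp [hm]
            rw [pvF_two_plain r r' rs' hm', h]
            simp [pvStepB, hm']

-- ===== VERDICT (by name: the statement is the Claim_ definition above) =====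
theorem split_flights_spec : Claim_equal_split_flights := by
  intro data _ _
  show split_flights data = split_flights_alt data
  rw [pvA_eq_F, pvB_eq_F]
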